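-- pv_equiv track=rewrite | github.com/maxh213/alocasia-info-backend | main.py | get_first_name
-- ===== SOURCE A (Python) =====
-- def get_first_name(full_name):
--     first_name = ""
--     has_the_first_name_finished = False
--
--     for letter in full_name:
--         if letter == " ":
--             has_the_first_name_finished = True
--
--         if has_the_first_name_finished == False:
--             first_name = first_name + letter
--
--     return first_name
-- ===== SOURCE B (Python) =====
-- def get_first_name(full_name):
--     idx = full_name.find(" ")
--     if idx == -1:
--         return full_name
--     return full_name[:idx]
-- ===== Notes on version B (the rewrite author's own statement) =====
-- stated objective: simpler
-- what changed: Replaces the char-by-char accumulation loop with a boolean stop flag by locating the first space with str.find and slicing the prefix once.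
import Mathlib
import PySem

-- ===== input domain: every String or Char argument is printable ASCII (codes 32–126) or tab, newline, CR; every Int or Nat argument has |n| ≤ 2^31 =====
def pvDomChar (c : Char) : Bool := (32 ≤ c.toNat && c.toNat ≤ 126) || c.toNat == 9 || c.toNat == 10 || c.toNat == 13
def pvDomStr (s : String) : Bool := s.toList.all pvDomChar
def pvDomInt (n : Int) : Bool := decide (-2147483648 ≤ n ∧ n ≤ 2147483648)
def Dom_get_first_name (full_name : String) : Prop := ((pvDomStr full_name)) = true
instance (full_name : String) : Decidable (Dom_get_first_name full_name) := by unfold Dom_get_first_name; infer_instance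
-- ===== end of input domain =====

-- B replaces A's char-by-char accumulation loop (with a boolean stop flag) by find-first-space then slice; objective: simpler.


-- ===== PORT A =====
-- one iteration of A's loop body: check the space first, then append only if the flag is still down
def pvStepA (st : List Char × Bool) (letter : Char) : List Char × Bool :=
  let fin := if letter == ' ' then true else st.2
  (if fin == false then st.1 ++ [letter] else st.1, fin)

def get_first_name (full_name : String) : String :=
  let st := full_name.toList.foldl pvStepA ([], false)
  String.ofList st.1

-- ===== PORT B =====
-- idx = full_name.find(" "); full_name if idx == -1 else full_name[:idx]
def get_first_name_alt (full_name : String) : String :=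
  let idx := PySem.Chars.find full_name.toList [' ']
  if idx = -1 then full_name
  else String.ofList (PySem.List.slice full_name.toList none (some idx))

-- ===== PRECONDITION & SPEC =====
def Spec_get_first_name (full_name : String) (out : String) : Prop := out = get_first_name_alt full_name
instance (full_name : String) (out : String) : Decidable (Spec_get_first_name full_name out) := by unfold Spec_get_first_name; infer_instance

-- ===== CLAIM (what is proved, stated in full; the proofs are below) =====
def Claim_equal_get_first_name : Prop := ∀ (full_name : String), Dom_get_first_name full_name → Spec_get_first_name full_name (get_first_name full_name)

-- ===== LEMMAS AND PROOFS =====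

-- A's loop: once the flag is up nothing is ever appended
theorem foldA_true (cs : List Char) (acc : List Char) :
    cs.foldl pvStepA (acc, true) = (acc, true) := by
  induction cs with
  | nil => rfl
  | cons c cs ih =>
    have h : pvStepA (acc, true) c = (acc, true) := by
      by_cases hc : c = ' ' <;> simp [pvStepA, hc]
    rw [List.foldl_cons, h, ih]

-- while the flag is down the loop copies exactly the prefix of non-space characters
theorem foldA_false (cs : List Char) (acc : List Char) :
    (cs.foldl pvStepA (acc, false)).1 = acc ++ cs.takeWhile (fun c => !(c == ' ')) := by
  induction cs generalizing acc with
  | nil => simp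
  | cons c cs ih =>
    by_cases hc : c = ' '
    · have h : pvStepA (acc, false) c = (acc, true) := by simp [pvStepA, hc]
      rw [List.foldl_cons, h, foldA_true]
      simp [hc]
    · have h : pvStepA (acc, false) c = (acc ++ [c], false) := by simp [pvStepA, hc]
      rw [List.foldl_cons, h, ih]
      simp [hc]

theorem get_first_name_eq_takeWhile (s : String) :
    get_first_name s = String.ofList (s.toList.takeWhile (fun c => !(c == ' '))) := by
  simp [get_first_name, foldA_false]

-- a singleton prefix of a drop is exactly a getElem? fact
theorem singleton_prefix_drop_iff (l : List Char) (i : Nat) (a : Char) :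
    [a] <+: l.drop i ↔ l[i]? = some a := by
  rw [← List.head?_drop]
  cases h : (l.drop i) with
  | nil => simp
  | cons b t => simp [List.cons_prefix_cons, eq_comm]

-- take n is takeWhile p when p holds strictly before n and fails at n (if n is in range)
theorem takeWhile_eq_take_of (p : Char → Bool) :
    ∀ (cs : List Char) (n : Nat),
      (∀ i, i < n → ∀ c, cs[i]? = some c → p c = true) →
      (∀ c, cs[n]? = some c → p c = false) →
      cs.takeWhile p = cs.take n := by
  intro cs
  induction cs with
  | nil => simp
  | cons c cs ih =>
    intro n h1 h2
    cases n with
    | zero =>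
      have := h2 c (by simp)
      simp [this]
    | succ m =>
      have hc : p c = true := h1 0 (Nat.succ_pos m) c (by simp)
      rw [List.takeWhile_cons, hc]
      simp only [List.take_succ_cons]
      rw [ih m (fun i hi d hd => h1 (i + 1) (by omega) d (by simpa using hd))
            (fun d hd => h2 d (by simpa using hd))]
      simp

-- B computes the same non-space prefix
theorem alt_eq_takeWhile (s : String) :
    get_first_name_alt s = String.ofList (s.toList.takeWhile (fun c => !(c == ' '))) := by
  unfold get_first_name_alt
  by_cases h : PySem.Chars.find s.toList [' '] = -1
  · rw [if_pos h]
    rw [PySem.Chars.find_eq_neg_one_iff] at h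
    have hmem : ' ' ∉ s.toList := fun hm => h ((List.singleton_infix_iff _ _).mpr hm)
    rw [List.takeWhile_eq_self_iff.mpr ?_, String.ofList_toList]
    intro a ha
    simp only [Bool.not_eq_eq_eq_not, Bool.not_true, beq_eq_false_iff_ne, ne_eq]
    intro he
    exact hmem (he ▸ ha)
  · rw [if_neg h]
    have hnn : 0 ≤ PySem.Chars.find s.toList [' '] := by
      have := PySem.Chars.neg_one_le_find s.toList [' ']
      omega
    obtain ⟨hpre, hmin⟩ := PySem.Chars.find_spec hnn
    set n := (PySem.Chars.find s.toList [' ']).toNat with hn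
    have hidx : PySem.Chars.find s.toList [' '] = ((n : Nat) : Int) :=
      (Int.toNat_of_nonneg hnn).symm
    rw [hidx, PySem.List.slice_to_natCast]
    congr 1
    symm
    apply takeWhile_eq_take_of
    · intro i hi d hd
      have hni : ¬ [' '] <+: s.toList.drop i := hmin i hi
      rw [singleton_prefix_drop_iff] at hni
      simp only [Bool.not_eq_eq_eq_not, Bool.not_true, beq_eq_false_iff_ne, ne_eq]
      intro he
      exact hni (by rw [hd, he])
    · intro d hd
      have : s.toList[n]? = some ' ' := (singleton_prefix_drop_iff _ _ _).mp hpre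
      rw [this] at hd
      cases hd
      simp

-- ===== VERDICT (by name: the statement is the Claim_ definition above) =====
theorem get_first_name_spec : Claim_equal_get_first_name := by
  intro s _
  unfold Spec_get_first_name
  rw [get_first_name_eq_takeWhile, alt_eq_takeWhile]
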